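-- pv_equiv track=rewrite | github.com/trsali37/care-finder | project.py | symptom
-- ===== SOURCE A (Python) =====
-- def symptom(clean_user_symptom):
--     data = {
--         "covid":"UC",
--         "fatigue":"UC",
--         "cough":"UC",
--         "sore throat":"UC",
--         "body ache":"UC",
--         "seizures":"ER",
--         "broken bones":"ER",
--         "loss of vision":"ER",
--         "fainting":"ER",
--         "chest pain":"ER",
--         "allergies":"UC",
--         "animal bites":"UC",
--         "insect bites":"UC",
--         "tick removal":"UC",
--         "bone fractures":"UC",
--         "bronchitis":"UC",
--         "congestion, nasal and chest":"UC",
--         "colds":"UC",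
--         "diarrhea":"UC",
--         "ear infection":"UC",
--         "fever":"UC",
--         "flu":"UC",
--         "un-wellness":"UC",
--         "minor asthma":"UC",
--         "minor burns":"UC",
--         "minor cuts":"UC",
--         "pink eye":"UC",
--         "rashes":"UC",
--         "sinus infection":"UC",
--         "sports injuries":"UC",
--         "sprain":"UC",
--         "strain":"UC",
--         "stings":"UC",
--         "sunburn or sun poisoning":"UC",
--         "upper respiratory infection":"UC",
--         "urinary tract infections":"UC",
--         "flu":"UC",
--         "pneumonia":"UC",
--         "tetanus":"UC",
--         "pertussis":"UC",
--         "shingles":"UC",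
--         "vomiting":"UC"
--     }
--     #iterate over each symptom in user_syptom list
--     for symptom in clean_user_symptom:
--         if symptom not in data:
--             return "Emergency Room"
--         elif data[symptom] == "ER":
--             return "Emergency Room"
--     return "Urgent Care"
-- ===== SOURCE B (Python) =====
-- UC_SORTED = sorted({
--     "covid", "fatigue", "cough", "sore throat", "body ache",
--     "allergies", "animal bites", "insect bites", "tick removal",
--     "bone fractures", "bronchitis", "congestion, nasal and chest",
--     "colds", "diarrhea", "ear infection", "fever", "flu",
--     "un-wellness", "minor asthma", "minor burns", "minor cuts",
--     "pink eye", "rashes", "sinus infection", "sports injuries",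
--     "sprain", "strain", "stings", "sunburn or sun poisoning",
--     "upper respiratory infection", "urinary tract infections",
--     "pneumonia", "tetanus", "pertussis", "shingles", "vomiting"})
--
--
-- def symptom(clean_user_symptom):
--     # Merge-style subset test: walk the sorted, deduplicated input and the
--     # sorted Urgent-Care list in lockstep with one pointer.
--     xs = sorted(set(clean_user_symptom))
--     n = len(UC_SORTED)
--     j = 0
--     for x in xs:
--         while j < n and UC_SORTED[j] < x:
--             j += 1
--         if j == n or UC_SORTED[j] != x:
--             return "Emergency Room"
--         j += 1
--     return "Urgent Care"
-- ===== Notes on version B (the rewrite author's own statement) =====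
-- stated objective: alternative
-- what changed: Replaced A's per-symptom dict-lookup loop with early returns by a sort-then-merge subset check: the input is deduplicated and sorted, then scanned in lockstep with a precomputed sorted Urgent-Care list using a single advancing pointer.
import Mathlib
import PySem

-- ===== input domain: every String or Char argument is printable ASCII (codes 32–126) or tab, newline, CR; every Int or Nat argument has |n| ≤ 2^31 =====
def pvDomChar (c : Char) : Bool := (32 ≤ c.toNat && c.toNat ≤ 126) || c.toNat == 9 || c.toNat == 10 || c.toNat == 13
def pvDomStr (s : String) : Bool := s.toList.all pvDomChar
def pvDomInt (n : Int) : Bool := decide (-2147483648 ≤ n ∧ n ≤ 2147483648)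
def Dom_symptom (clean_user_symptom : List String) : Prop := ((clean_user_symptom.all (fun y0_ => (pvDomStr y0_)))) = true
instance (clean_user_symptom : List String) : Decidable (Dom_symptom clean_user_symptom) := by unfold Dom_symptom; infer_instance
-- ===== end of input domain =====

-- B replaces A's per-symptom dict-lookup early-return loop by a sort-then-merge subset check: the deduplicated input is sorted and scanned in lockstep with the sorted Urgent-Care list by one pointer (objective: alternative).


-- ===== PORT A =====
-- the dict literal 'data' (the Python dict literal collapses the duplicate "flu" key; both occurrences map to "UC")
def pvDataList : List (String × String) := [
  ("covid", "UC"), ("fatigue", "UC"), ("cough", "UC"), ("sore throat", "UC"),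
  ("body ache", "UC"), ("seizures", "ER"), ("broken bones", "ER"),
  ("loss of vision", "ER"), ("fainting", "ER"), ("chest pain", "ER"),
  ("allergies", "UC"), ("animal bites", "UC"), ("insect bites", "UC"),
  ("tick removal", "UC"), ("bone fractures", "UC"), ("bronchitis", "UC"),
  ("congestion, nasal and chest", "UC"), ("colds", "UC"), ("diarrhea", "UC"),
  ("ear infection", "UC"), ("fever", "UC"), ("flu", "UC"), ("un-wellness", "UC"),
  ("minor asthma", "UC"), ("minor burns", "UC"), ("minor cuts", "UC"),
  ("pink eye", "UC"), ("rashes", "UC"), ("sinus infection", "UC"),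
  ("sports injuries", "UC"), ("sprain", "UC"), ("strain", "UC"), ("stings", "UC"),
  ("sunburn or sun poisoning", "UC"), ("upper respiratory infection", "UC"),
  ("urinary tract infections", "UC"), ("pneumonia", "UC"), ("tetanus", "UC"),
  ("pertussis", "UC"), ("shingles", "UC"), ("vomiting", "UC")]

def pvData : PySem.Dict String String := PySem.Dict.mk pvDataList

-- the for-loop with its two early returns, as structural recursion
def symptom (clean_user_symptom : List String) : String :=
  match clean_user_symptom with
  | [] => "Urgent Care"
  | s :: rest =>
    match pvData.get? s with
    | none => "Emergency Room"                            -- symptom not in data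
    | some v => if v == "ER" then "Emergency Room"        -- data[symptom] == "ER"
                else symptom rest

-- ===== PORT B =====
-- the set literal inside Source B's UC_SORTED = sorted({...})
def pvUcLit : List String := [
  "covid", "fatigue", "cough", "sore throat", "body ache",
  "allergies", "animal bites", "insect bites", "tick removal",
  "bone fractures", "bronchitis", "congestion, nasal and chest",
  "colds", "diarrhea", "ear infection", "fever", "flu",
  "un-wellness", "minor asthma", "minor burns", "minor cuts",
  "pink eye", "rashes", "sinus infection", "sports injuries",
  "sprain", "strain", "stings", "sunburn or sun poisoning",
  "upper respiratory infection", "urinary tract infections",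
  "pneumonia", "tetanus", "pertussis", "shingles", "vomiting"]

-- UC_SORTED = sorted({...})
def pvUcSorted : List String :=
  PySem.List.sorted (PySem.Set.ofList pvUcLit) (fun x => x) false

-- the for-loop over xs with its inner while over UC_SORTED, as lockstep recursion
-- on (remaining xs, remaining UC_SORTED suffix from pointer j)
def pvMerge (xs ys : List String) : Bool :=
  match xs, ys with
  | [], _ => true                                   -- for-loop finished: "Urgent Care"
  | _ :: _, [] => false                             -- j == n: "Emergency Room"
  | x :: xs', y :: ys' =>
    if y < x then pvMerge (x :: xs') ys'            -- while UC_SORTED[j] < x: j += 1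
    else if y == x then pvMerge xs' ys'             -- match: next x, j += 1
    else false                                      -- UC_SORTED[j] != x: "Emergency Room"

def symptom_alt (clean_user_symptom : List String) : String :=
  -- xs = sorted(set(clean_user_symptom)); merge scan against UC_SORTED
  if pvMerge (PySem.List.sorted (PySem.Set.ofList clean_user_symptom) (fun x => x) false)
             pvUcSorted
  then "Urgent Care" else "Emergency Room"

-- ===== PRECONDITION & SPEC =====
def Spec_symptom (clean_user_symptom : List String) (out : String) : Prop := out = symptom_alt clean_user_symptom
instance (clean_user_symptom : List String) (out : String) : Decidable (Spec_symptom clean_user_symptom out) := by unfold Spec_symptom; infer_instance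

-- ===== CLAIM (what is proved, stated in full; the proofs are below) =====
def Claim_equal_symptom : Prop := ∀ (clean_user_symptom : List String), Dom_symptom clean_user_symptom → Spec_symptom clean_user_symptom (symptom clean_user_symptom)

-- ===== LEMMAS AND PROOFS =====

-- A's loop continues past s exactly when the dict's (unique) entry for s has value "UC";
-- for an assoc list with nodup keys and UC/ER values that is membership in the UC-key list.
lemma pv_gen (L : List (String × String)) (s : String)
    (hv : ∀ p ∈ L, p.2 = "UC" ∨ p.2 = "ER") (hnd : (L.map Prod.fst).Nodup) :
    (match (PySem.Dict.mk L).get? s with | none => false | some v => !(v == "ER"))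
    = decide (s ∈ (L.filter (fun p => p.2 == "UC")).map Prod.fst) := by
  induction L with
  | nil => simp [PySem.Dict.get?]
  | cons p rest ih =>
    obtain ⟨k, v⟩ := p
    rw [PySem.Dict.get?_mk_cons]
    simp only [List.map_cons, List.nodup_cons] at hnd
    have hnk : k ∉ (rest.map Prod.fst) := hnd.1
    by_cases h : k = s
    · subst h
      simp only [beq_self_eq_true, if_true]
      have hcf : k ∉ ((rest.filter (fun p => p.2 == "UC")).map Prod.fst) := by
        rintro hm
        obtain ⟨q, hq, rfl⟩ := List.mem_map.mp hm
        exact hnk (List.mem_map.mpr ⟨q, (List.mem_filter.mp hq).1, rfl⟩)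
      rcases hv (k, v) (by simp) with hUC | hER
      · subst hUC; rw [List.filter_cons]; simp
      · subst hER
        rw [List.filter_cons]
        simp only [show (((k, ("ER" : String)).2 == "UC")) = false from rfl, Bool.false_eq_true,
          if_false, show (!(("ER" : String) == "ER")) = false from rfl]
        exact (decide_eq_false hcf).symm
    · have hbeq : (k == s) = false := beq_eq_false_iff_ne.mpr h
      rw [hbeq]
      simp only [Bool.false_eq_true, if_false]
      rw [ih (fun q hq => hv q (List.mem_cons_of_mem _ hq)) hnd.2]
      by_cases hvUC : v = "UC"
      · subst hvUC
        simp
        intro hsk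
        exact absurd hsk.symm h
      · rw [List.filter_cons]
        simp [beq_eq_false_iff_ne.mpr hvUC]

-- the generic lemma instantiated at the dict literal: A continues past s iff s is a UC key
lemma pv_step (s : String) :
    (match pvData.get? s with | none => false | some v => !(v == "ER"))
    = decide (s ∈ pvUcLit) := by
  have h := pv_gen pvDataList s (by decide) (by decide)
  have huc : (pvDataList.filter (fun p => p.2 == "UC")).map Prod.fst = pvUcLit := by decide
  rw [huc] at h
  exact h

-- A's loop, characterised: "Urgent Care" iff every input symptom is a UC key
lemma pv_A_char (l : List String) :
    symptom l = if l.all (fun s => decide (s ∈ pvUcLit)) then "Urgent Care" else "Emergency Room" := by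
  induction l with
  | nil => rfl
  | cons s rest ih =>
    show (match pvData.get? s with
      | none => "Emergency Room"
      | some v => if v == "ER" then "Emergency Room" else symptom rest) = _
    rw [List.all_cons]
    have hs := pv_step s
    cases hget : pvData.get? s with
    | none =>
      rw [hget] at hs
      have hs' : false = decide (s ∈ pvUcLit) := hs
      simp only [← hs', Bool.false_and, Bool.false_eq_true, if_false]
    | some v =>
      rw [hget] at hs
      have hs' : (!(v == "ER")) = decide (s ∈ pvUcLit) := hs
      by_cases hv : (v == "ER") = true
      · rw [hv] at hs'
        have hsF : decide (s ∈ pvUcLit) = false := by simpa using hs'.symm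
        simp only [hv, if_true, hsF, Bool.false_and, Bool.false_eq_true, if_false]
      · have hvf : (v == "ER") = false := Bool.eq_false_iff.mpr hv
        rw [hvf] at hs'
        have hsT : decide (s ∈ pvUcLit) = true := by simpa using hs'.symm
        simp only [hvf, Bool.false_eq_true, if_false, hsT, Bool.true_and]
        exact ih

-- all over a list respects pointwise-on-members equality of predicates
lemma pv_all_congr {l : List String} {p q : String → Bool}
    (h : ∀ x ∈ l, p x = q x) : l.all p = l.all q := by
  induction l with
  | nil => rfl
  | cons x xs ih =>
    rw [List.all_cons, List.all_cons, h x (List.mem_cons_self),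
      ih (fun z hz => h z (List.mem_cons_of_mem _ hz))]

-- the merge scan on two strictly increasing lists is exactly the subset test
lemma pv_merge_char (ys xs : List String)
    (hxs : xs.Pairwise (· < ·)) (hys : ys.Pairwise (· < ·)) :
    pvMerge xs ys = xs.all (fun x => decide (x ∈ ys)) := by
  induction ys generalizing xs with
  | nil =>
    cases xs with
    | nil => rfl
    | cons x xs' => simp [pvMerge]
  | cons y ys' ih =>
    cases xs with
    | nil => rfl
    | cons x xs' =>
      rw [List.pairwise_cons] at hxs hys
      by_cases hlt : y < x
      · -- every element of x :: xs' is > y, so membership drops y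
        have hne : ∀ z ∈ x :: xs', z ∈ y :: ys' ↔ z ∈ ys' := by
          intro z hz
          have hyz : y < z := by
            rcases List.mem_cons.mp hz with rfl | hz'
            · exact hlt
            · exact lt_trans hlt (hxs.1 z hz')
          simp only [List.mem_cons, or_iff_right_iff_imp]
          rintro rfl; exact absurd hyz (lt_irrefl z)
        rw [show pvMerge (x :: xs') (y :: ys') =
            (if y < x then pvMerge (x :: xs') ys'
             else if y == x then pvMerge xs' ys' else false) from rfl,
          if_pos hlt]
        rw [ih (x :: xs') (List.pairwise_cons.mpr hxs) hys.2]
        exact pv_all_congr (fun z hz => decide_eq_decide.mpr (hne z hz).symm)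
      · by_cases heq : y = x
        · subst heq
          rw [show pvMerge (y :: xs') (y :: ys') =
              (if y < y then pvMerge (y :: xs') ys'
               else if y == y then pvMerge xs' ys' else false) from rfl,
            if_neg hlt, if_pos (beq_self_eq_true y)]
          rw [ih xs' hxs.2 hys.2, List.all_cons]
          have hmem : (decide (y ∈ y :: ys')) = true := by simp
          rw [hmem, Bool.true_and]
          refine pv_all_congr (fun z hz => decide_eq_decide.mpr ?_)
          have hyz : y < z := hxs.1 z hz
          simp only [List.mem_cons]
          exact ⟨Or.inr, fun h => h.resolve_left
            (fun he => absurd hyz (he ▸ lt_irrefl y))⟩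
        · -- x < y: x is below everything in y :: ys', so x ∉ and all = false
          have hxy : x < y := lt_of_le_of_ne (not_lt.mp hlt) (fun h => heq h.symm)
          have hbne : (y == x) = false := beq_eq_false_iff_ne.mpr heq
          rw [show pvMerge (x :: xs') (y :: ys') =
              (if y < x then pvMerge (x :: xs') ys'
               else if y == x then pvMerge xs' ys' else false) from rfl,
            if_neg hlt, hbne]
          simp only [Bool.false_eq_true, if_false]
          have hxnot : x ∉ y :: ys' := by
            intro hm
            rcases List.mem_cons.mp hm with rfl | hm'
            · exact lt_irrefl x hxy
            · exact absurd (lt_trans hxy (hys.1 x hm')) (lt_irrefl x)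
          rw [List.all_cons, decide_eq_false hxnot, Bool.false_and]

-- membership in UC_SORTED is membership in the literal set
lemma pv_mem_sorted (s : String) : s ∈ pvUcSorted ↔ s ∈ pvUcLit := by
  unfold pvUcSorted
  rw [PySem.List.mem_sorted _ _ _ _, PySem.Set.mem_ofList]

-- Bool-level: an all over the sorted dedup equals the all over the raw list
lemma pv_all_sorted (l : List String) (p : String → Prop) [DecidablePred p] :
    (PySem.List.sorted (PySem.Set.ofList l) (fun x => x) false).all (fun s => decide (p s))
    = l.all (fun s => decide (p s)) := by
  by_cases h : ∀ x ∈ l, p x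
  · rw [List.all_eq_true.mpr (fun x hx => decide_eq_true (h x hx)),
      List.all_eq_true.mpr (fun x hx => decide_eq_true
        (h x ((PySem.Set.mem_ofList l x).mp ((PySem.List.mem_sorted _ _ _ _).mp hx))))]
  · push Not at h
    obtain ⟨x, hx, hpx⟩ := h
    have hx' : x ∈ PySem.List.sorted (PySem.Set.ofList l) (fun x => x) false :=
      (PySem.List.mem_sorted _ _ _ _).mpr ((PySem.Set.mem_ofList l x).mpr hx)
    rw [List.all_eq_false.mpr ⟨x, hx', by simpa using hpx⟩,
      List.all_eq_false.mpr ⟨x, hx, by simpa using hpx⟩]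

lemma pv_main (l : List String) : symptom l = symptom_alt l := by
  rw [pv_A_char]
  unfold symptom_alt
  rw [pv_merge_char pvUcSorted _
    (PySem.List.sorted_ofList_pairwise_lt l)
    (by unfold pvUcSorted; exact PySem.List.sorted_ofList_pairwise_lt pvUcLit)]
  rw [show (fun x => decide (x ∈ pvUcSorted)) = (fun x => decide (x ∈ pvUcLit)) from
    funext fun x => decide_eq_decide.mpr (pv_mem_sorted x)]
  rw [pv_all_sorted l (fun s => s ∈ pvUcLit)]

-- ===== VERDICT (by name: the statement is the Claim_ definition above) =====
theorem symptom_spec : Claim_equal_symptom := by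
  intro l _
  unfold Spec_symptom
  exact pv_main l
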